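-- pv_equiv track=rewrite | github.com/OpenNLG/OpenBA | training/megatron/data/dataset_utils.py | create_tokens_and_tokentypes
-- ===== SOURCE A (Python) =====
-- def create_tokens_and_tokentypes(tokens_a, tokens_b, cls_id, sep_id):
--     """Merge segments A and B, add [CLS] and [SEP] and build tokentypes."""
--
--     tokens = []
--     tokentypes = []
--     # [CLS].
--     tokens.append(cls_id)
--     tokentypes.append(0)
--     # Segment A.
--     for token in tokens_a:
--         tokens.append(token)
--         tokentypes.append(0)
--     # [SEP].
--     tokens.append(sep_id)
--     tokentypes.append(0)
--     # Segment B.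
--     for token in tokens_b:
--         tokens.append(token)
--         tokentypes.append(1)
--     if tokens_b:
--         # [SEP].
--         tokens.append(sep_id)
--         tokentypes.append(1)
--
--     return tokens, tokentypes
-- ===== SOURCE B (Python) =====
-- def create_tokens_and_tokentypes(tokens_a, tokens_b, cls_id, sep_id):
--     """Merge segments A and B, add [CLS] and [SEP] and build tokentypes.
--
--     Index-driven: compute the total length up front, then fill both output
--     lists in a single pass over positions, selecting each token and its
--     tokentype by arithmetic on the position."""
--     a = list(tokens_a)
--     b = list(tokens_b)
--     la = len(a)
--     lb = len(b)
--     n = la + 2 + lb + (0 if lb == 0 else 1)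
--     boundary = la + 2
--     tokens = []
--     tokentypes = []
--     for i in range(n):
--         if i == 0:
--             t = cls_id
--         elif i <= la:
--             t = a[i - 1]
--         elif i == la + 1:
--             t = sep_id
--         elif i < la + 2 + lb:
--             t = b[i - la - 2]
--         else:
--             t = sep_id
--         tokens.append(t)
--         tokentypes.append(0 if i < boundary else 1)
--     return tokens, tokentypes
-- ===== Notes on version B (the rewrite author's own statement) =====
-- stated objective: alternative
-- what changed: Instead of A's staged append loops over the two segments, B computes the total output length up front and fills both lists in one index-driven pass, selecting each token and its tokentype by arithmetic case analysis on the position.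
import Mathlib
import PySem

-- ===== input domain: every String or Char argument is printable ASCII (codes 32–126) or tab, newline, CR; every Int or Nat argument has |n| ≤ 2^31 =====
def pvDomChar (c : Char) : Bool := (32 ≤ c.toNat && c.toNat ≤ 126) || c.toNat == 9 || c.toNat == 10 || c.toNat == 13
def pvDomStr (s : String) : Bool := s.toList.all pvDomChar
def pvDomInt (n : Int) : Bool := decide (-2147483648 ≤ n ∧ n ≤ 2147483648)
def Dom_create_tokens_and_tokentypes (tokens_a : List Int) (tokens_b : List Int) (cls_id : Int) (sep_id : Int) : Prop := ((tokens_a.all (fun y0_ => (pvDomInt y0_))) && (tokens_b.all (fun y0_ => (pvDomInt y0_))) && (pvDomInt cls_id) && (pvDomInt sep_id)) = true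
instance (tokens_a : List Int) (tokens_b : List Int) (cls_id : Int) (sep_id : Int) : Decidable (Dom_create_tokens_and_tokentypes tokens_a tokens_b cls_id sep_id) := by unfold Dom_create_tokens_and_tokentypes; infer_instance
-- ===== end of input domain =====

-- B replaces A's staged append loops with a single index-driven pass: it computes the
-- total length up front and selects each token/tokentype by arithmetic on the position
-- (objective: alternative).

-- ===== PORT A =====
-- literal transliteration: two append loops over a shared (tokens, tokentypes) state
def create_tokens_and_tokentypes (tokens_a : List Int) (tokens_b : List Int) (cls_id : Int) (sep_id : Int) : List Int × List Int :=
  let tokens : List Int := []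
  let tokentypes : List Int := []
  let tokens := tokens ++ [cls_id]
  let tokentypes := tokentypes ++ [0]
  let st := tokens_a.foldl (fun (s : List Int × List Int) token => (s.1 ++ [token], s.2 ++ [0])) (tokens, tokentypes)
  let tokens := st.1 ++ [sep_id]
  let tokentypes := st.2 ++ [0]
  let st := tokens_b.foldl (fun (s : List Int × List Int) token => (s.1 ++ [token], s.2 ++ [1])) (tokens, tokentypes)
  if tokens_b.isEmpty then (st.1, st.2)
  else (st.1 ++ [sep_id], st.2 ++ [1])

-- ===== PORT B =====
-- single pass over range(n); a[i-1] / b[i-la-2] are ported with pyGetD whose indices are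
-- provably in range wherever the branch is taken, so the default is never used
def create_tokens_and_tokentypes_alt (tokens_a : List Int) (tokens_b : List Int) (cls_id : Int) (sep_id : Int) : List Int × List Int :=
  let la : Int := tokens_a.length
  let lb : Int := tokens_b.length
  let n : Int := la + 2 + lb + (if lb = 0 then 0 else 1)
  let boundary : Int := la + 2
  (PySem.List.pyRange 0 n 1).foldl
    (fun (s : List Int × List Int) i =>
      let t : Int :=
        if i = 0 then cls_id
        else if i ≤ la then PySem.List.pyGetD tokens_a (i - 1) 0
        else if i = la + 1 then sep_id
        else if i < la + 2 + lb then PySem.List.pyGetD tokens_b (i - la - 2) 0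
        else sep_id
      (s.1 ++ [t], s.2 ++ [if i < boundary then (0 : Int) else 1]))
    ([], [])

-- ===== PRECONDITION & SPEC =====
def Spec_create_tokens_and_tokentypes (tokens_a : List Int) (tokens_b : List Int) (cls_id : Int) (sep_id : Int) (out : List Int × List Int) : Prop := out = create_tokens_and_tokentypes_alt tokens_a tokens_b cls_id sep_id
instance (tokens_a : List Int) (tokens_b : List Int) (cls_id : Int) (sep_id : Int) (out : List Int × List Int) : Decidable (Spec_create_tokens_and_tokentypes tokens_a tokens_b cls_id sep_id out) := by unfold Spec_create_tokens_and_tokentypes; infer_instance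

-- ===== CLAIM =====
def Claim_equal_create_tokens_and_tokentypes : Prop := ∀ (tokens_a : List Int) (tokens_b : List Int) (cls_id : Int) (sep_id : Int), Dom_create_tokens_and_tokentypes tokens_a tokens_b cls_id sep_id → Spec_create_tokens_and_tokentypes tokens_a tokens_b cls_id sep_id (create_tokens_and_tokentypes tokens_a tokens_b cls_id sep_id)

-- ===== LEMMAS AND PROOFS =====

-- A's append loop equals concatenation with a replicated tokentype segment.
theorem foldl_append_pair (l : List Int) (c : Int) (x y : List Int) :
    l.foldl (fun (s : List Int × List Int) token => (s.1 ++ [token], s.2 ++ [c])) (x, y)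
      = (x ++ l, y ++ List.replicate l.length c) := by
  induction l generalizing x y with
  | nil => simp
  | cons h t ih =>
      simp only [List.foldl_cons, ih, List.replicate_succ, List.append_assoc,
        List.cons_append, List.nil_append, List.length_cons]

-- B's per-index loop equals a pair of maps over the index list.
theorem foldl_pair_map (l : List Int) (f g : Int → Int) (x y : List Int) :
    l.foldl (fun (s : List Int × List Int) i => (s.1 ++ [f i], s.2 ++ [g i])) (x, y)
      = (x ++ l.map f, y ++ l.map g) := by
  induction l generalizing x y with
  | nil => simp
  | cons h t ih => simp [ih]

theorem map_getD_range (l : List Int) (d : Int) :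
    (List.range l.length).map (fun k => l.getD k d) = l := by
  apply List.ext_getElem
  · simp
  · intro i h1 h2
    simp [List.getElem_range, List.getElem?_eq_getElem h2]


theorem pyRange_shift_map (c : Int) (m : Nat) (f : Int → Int) :
    (PySem.List.pyRange c (c + m) 1).map f = (List.range m).map (fun k : Nat => f (c + (k : Int))) := by
  rw [PySem.List.pyRange_one]
  have h : (c + (m : Int) - c).toNat = m := by omega
  rw [h, List.map_map]
  rfl

theorem map_range_eq_getD (l : List Int) (c : Int) (f : Int → Int)
    (hf : ∀ k : Nat, k < l.length → f (c + k) = l.getD k 0) :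
    (PySem.List.pyRange c (c + l.length) 1).map f = l := by
  rw [pyRange_shift_map,
    List.map_congr_left (fun k hk => hf k (List.mem_range.mp hk))]
  exact map_getD_range l 0

theorem map_range_const (c : Int) (m : Nat) (f : Int → Int) (v : Int)
    (hf : ∀ k : Nat, k < m → f (c + k) = v) :
    (PySem.List.pyRange c (c + m) 1).map f = List.replicate m v := by
  rw [pyRange_shift_map,
    List.map_congr_left (fun k hk => hf k (List.mem_range.mp hk))]
  simp

-- ===== VERDICT =====
set_option maxHeartbeats 1000000 in
theorem create_tokens_and_tokentypes_spec : Claim_equal_create_tokens_and_tokentypes := by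
  intro a b cls_id sep_id _
  unfold Spec_create_tokens_and_tokentypes create_tokens_and_tokentypes create_tokens_and_tokentypes_alt
  simp only [foldl_append_pair, foldl_pair_map, List.nil_append]
  by_cases hb : b = []
  · subst hb
    simp only [List.isEmpty_nil, List.length_nil, Nat.cast_zero,
      List.replicate_zero, List.append_nil, if_true, add_zero]
    rw [
      PySem.List.pyRange_one_append 0 1 ((a.length : Int) + 2) (by omega) (by omega),
      PySem.List.pyRange_one_append 1 (1 + (a.length : Int)) ((a.length : Int) + 2) (by omega) (by omega)]
    have h01 : PySem.List.pyRange 0 1 1 = [0] := by decide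
    have hlast : PySem.List.pyRange (1 + (a.length : Int)) ((a.length : Int) + 2) 1 = [1 + (a.length : Int)] := by
      rw [show ((a.length : Int) + 2) = (1 + (a.length : Int)) + 1 by ring,
        PySem.List.pyRange_one_singleton]
    rw [h01, hlast]
    simp only [List.map_append, List.map_cons, List.map_nil]
    rw [map_range_eq_getD a 1 _ (by
      intro k hk
      rw [if_neg (by omega), if_pos (by omega),
        show (1 : Int) + (k : Int) - 1 = (k : Int) by ring, PySem.List.pyGetD_natCast])]
    rw [map_range_const 1 a.length _ (0 : Int) (by intro k hk; rw [if_pos (by omega)])]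
    split_ifs <;> first | (simp; done) | omega
  · have hne : b.isEmpty = false := by simp [hb]
    have hlb : ((b.length : Int)) ≠ 0 := by simp [hb]
    simp only [hne, Bool.false_eq_true, if_false, if_neg hlb]
    rw [PySem.List.pyRange_one_append 0 1 _ (by omega) (by omega),
      PySem.List.pyRange_one_append 1 (1 + (a.length : Int)) _ (by omega) (by omega),
      PySem.List.pyRange_one_append (1 + (a.length : Int)) ((a.length : Int) + 2) _ (by omega) (by omega),
      PySem.List.pyRange_one_append ((a.length : Int) + 2) ((a.length : Int) + 2 + (b.length : Int)) _ (by omega) (by omega)]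
    have h01 : PySem.List.pyRange 0 1 1 = [0] := by decide
    have hmid : PySem.List.pyRange (1 + (a.length : Int)) ((a.length : Int) + 2) 1 = [1 + (a.length : Int)] := by
      rw [show ((a.length : Int) + 2) = (1 + (a.length : Int)) + 1 by ring,
        PySem.List.pyRange_one_singleton]
    have hlast : PySem.List.pyRange ((a.length : Int) + 2 + (b.length : Int)) ((a.length : Int) + 2 + (b.length : Int) + 1) 1
        = [(a.length : Int) + 2 + (b.length : Int)] := PySem.List.pyRange_one_singleton _
    rw [h01, hmid, hlast]
    simp only [List.map_append, List.map_cons, List.map_nil]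
    rw [map_range_eq_getD a 1 _ (by
      intro k hk
      rw [if_neg (by omega), if_pos (by omega),
        show (1 : Int) + (k : Int) - 1 = (k : Int) by ring, PySem.List.pyGetD_natCast])]
    rw [map_range_const 1 a.length _ (0 : Int) (by intro k hk; rw [if_pos (by omega)])]
    rw [map_range_eq_getD b ((a.length : Int) + 2) _ (by
      intro k hk
      rw [if_neg (by omega), if_neg (by omega), if_neg (by omega), if_pos (by omega),
        show ((a.length : Int) + 2 + (k : Int) - (a.length : Int) - 2) = (k : Int) by ring,
        PySem.List.pyGetD_natCast])]
    rw [map_range_const ((a.length : Int) + 2) b.length _ (1 : Int) (by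
      intro k hk; rw [if_neg (by omega)])]
    split_ifs <;> first | (simp; done) | omega
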